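-- pv_equiv track=rewrite | github.com/ClaudioCarvalhoo/you-can-accomplish-anything-with-just-enough-determination-and-a-little-bit-of-luck | problems/LC1895.py | buildFirstDiagonalSum
-- ===== SOURCE A (Python) =====
-- def buildFirstDiagonalSum(grid):
--     firstDiagonalSum = []
--     for y in range(len(grid)):
--         firstDiagonalSum.append([])
--         for x in range(len(grid[y])):
--             prev = 0
--             if y > 0 and x > 0:
--                 prev = firstDiagonalSum[y - 1][x - 1]
--             firstDiagonalSum[-1].append(prev + grid[y][x])
--     return firstDiagonalSum
-- ===== SOURCE B (Python) =====
-- def buildFirstDiagonalSum(grid):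
--     # closed form: each cell is the sum of the grid values along its diagonal
--     # back to the nearest top/left border, independent of any previously
--     # computed table cell
--     return [
--         [
--             sum(grid[y - i][x - i] for i in range(min(y, x) + 1))
--             for x in range(len(grid[y]))
--         ]
--         for y in range(len(grid))
--     ]
-- ===== Notes on version B (the rewrite author's own statement) =====
-- stated objective: alternative
-- what changed: B computes each cell directly as the closed-form sum of grid values along its diagonal back to the top/left border, instead of A's dynamic-programming table that reads the previously computed cell result[y-1][x-1]; this trades the DP recurrence for independent per-cell sums (cubic instead of quadratic work).
import Mathlib
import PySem

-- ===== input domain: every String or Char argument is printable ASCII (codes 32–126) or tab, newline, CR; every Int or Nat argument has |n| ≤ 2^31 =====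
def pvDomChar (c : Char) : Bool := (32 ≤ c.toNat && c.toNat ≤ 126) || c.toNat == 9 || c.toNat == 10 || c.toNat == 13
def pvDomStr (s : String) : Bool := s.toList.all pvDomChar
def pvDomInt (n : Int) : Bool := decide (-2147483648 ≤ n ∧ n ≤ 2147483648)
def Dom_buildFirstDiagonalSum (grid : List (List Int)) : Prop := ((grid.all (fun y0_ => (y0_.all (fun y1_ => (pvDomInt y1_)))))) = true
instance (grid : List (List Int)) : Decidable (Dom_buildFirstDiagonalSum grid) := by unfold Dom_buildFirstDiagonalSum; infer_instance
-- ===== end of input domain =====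

-- B replaces A's dynamic-programming table reads (result[y-1][x-1]) by a direct
-- closed-form sum along each cell's diagonal back to the border (alternative
-- decomposition; not claimed faster).

-- ===== PORT A =====
-- Literal transliteration of A. grid[y] / grid[y][x] are indexed by loop
-- variables of range(len(...)), hence always in range: getD is exact there.
-- firstDiagonalSum[y-1][x-1] may raise IndexError in Python; ported via pyGet?
-- (none = IndexError), with .getD 0 as placeholder on inputs Pre_ excludes.
-- (In Python the partially built current row is already appended to the table
-- while the inner loop runs; index y-1 never reaches it, so folding with the
-- completed rows only yields the same reads.)
def buildFirstDiagonalSum (grid : List (List Int)) : List (List Int) :=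
  (List.range grid.length).foldl (fun acc (y : Nat) =>
    acc ++ [((List.range (grid.getD y []).length).foldl (fun r (x : Nat) =>
      r ++ [(if 0 < y ∧ 0 < x then
               ((PySem.List.pyGet? acc ((y : Int) - 1)).bind
                 (fun pr => PySem.List.pyGet? pr ((x : Int) - 1))).getD 0
             else 0) + (grid.getD y []).getD x 0]) [])]) []

-- ===== PORT B =====
-- sum(grid[y-i][x-i] for i in range(min(y,x)+1)); indices are in range under
-- Pre_, so getD is exact there.
def diagSum (grid : List (List Int)) (y x : Nat) : Int :=
  ((List.range (min y x + 1)).map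
    (fun i => (grid.getD (y - i) []).getD (x - i) 0)).sum

def buildFirstDiagonalSum_alt (grid : List (List Int)) : List (List Int) :=
  (List.range grid.length).map (fun y =>
    (List.range (grid.getD y []).length).map (fun x => diagSum grid y x))

-- ===== PRECONDITION & SPEC =====
-- Pre_ excludes exactly the ragged grids where some row is more than one cell
-- longer than its predecessor: there Python A raises IndexError (and Python B
-- raises too), so no return value is claimed.
def Pre_buildFirstDiagonalSum (grid : List (List Int)) : Prop :=
  List.IsChain (fun r1 r2 => r2.length ≤ r1.length + 1) grid
instance (grid : List (List Int)) : Decidable (Pre_buildFirstDiagonalSum grid) := by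
  unfold Pre_buildFirstDiagonalSum; infer_instance

def pvWitness_buildFirstDiagonalSum : List (List Int) := [[1], [2, 3], [4, 5]]

def Spec_buildFirstDiagonalSum (grid : List (List Int)) (out : List (List Int)) : Prop := out = buildFirstDiagonalSum_alt grid
instance (grid : List (List Int)) (out : List (List Int)) : Decidable (Spec_buildFirstDiagonalSum grid out) := by unfold Spec_buildFirstDiagonalSum; infer_instance

-- ===== CLAIM (what is proved, stated in full; the proofs are below) =====
def Claim_equal_buildFirstDiagonalSum : Prop := ∀ (grid : List (List Int)), Dom_buildFirstDiagonalSum grid → Pre_buildFirstDiagonalSum grid → Spec_buildFirstDiagonalSum grid (buildFirstDiagonalSum grid)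

-- ===== LEMMAS AND PROOFS =====

-- recurrence of the closed form
lemma diagSum_succ (grid : List (List Int)) (y x : Nat) :
    diagSum grid (y + 1) (x + 1) = diagSum grid y x + (grid.getD (y + 1) []).getD (x + 1) 0 := by
  unfold diagSum
  rw [Nat.succ_min_succ, List.range_succ_eq_map]
  simp only [List.map_cons, List.map_map, List.sum_cons, Nat.sub_zero]
  have : ((fun i => (grid.getD (y + 1 - i) []).getD (x + 1 - i) 0) ∘ Nat.succ)
       = (fun i => (grid.getD (y - i) []).getD (x - i) 0) := by
    funext i
    show (grid.getD (y + 1 - (i + 1)) []).getD (x + 1 - (i + 1)) 0 = _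
    rw [(by omega : y + 1 - (i + 1) = y - i), (by omega : x + 1 - (i + 1) = x - i)]
  rw [this]; ring

lemma diagSum_border (grid : List (List Int)) (y x : Nat) (h : y = 0 ∨ x = 0) :
    diagSum grid y x = (grid.getD y []).getD x 0 := by
  unfold diagSum
  have : min y x = 0 := by omega
  simp [this]

-- one row of B
def rowAlt (grid : List (List Int)) (y : Nat) : List Int :=
  (List.range (grid.getD y []).length).map (fun x => diagSum grid y x)

lemma alt_eq (grid : List (List Int)) :
    buildFirstDiagonalSum_alt grid = (List.range grid.length).map (rowAlt grid) := rfl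

-- Pre_ gives the length step between adjacent rows
lemma pre_len (grid : List (List Int)) (hpre : Pre_buildFirstDiagonalSum grid)
    (i : Nat) (h : i + 1 < grid.length) :
    (grid.getD (i + 1) []).length ≤ (grid.getD i []).length + 1 := by
  have := List.isChain_iff_getElem.mp hpre i h
  simpa [List.getD_eq_getElem?_getD, List.getElem?_eq_getElem, h,
         (by omega : i < grid.length)] using this

-- inner loop produces rowAlt, given the completed rows so far
lemma inner_eq (grid : List (List Int)) (y : Nat) (hy : y < grid.length)
    (hlen : 0 < y → (grid.getD y []).length ≤ (grid.getD (y - 1) []).length + 1)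
    (m : Nat) (hm : m ≤ (grid.getD y []).length) :
    (List.range m).foldl (fun r (x : Nat) =>
      r ++ [(if 0 < y ∧ 0 < x then
               ((PySem.List.pyGet? ((List.range y).map (rowAlt grid)) ((y : Int) - 1)).bind
                 (fun pr => PySem.List.pyGet? pr ((x : Int) - 1))).getD 0
             else 0) + (grid.getD y []).getD x 0]) []
    = (List.range m).map (fun x => diagSum grid y x) := by
  induction m with
  | zero => simp
  | succ m ih =>
    rw [List.range_succ, List.foldl_append, List.map_append,
        ih (by omega)]
    simp only [List.foldl_cons, List.foldl_nil, List.map_cons, List.map_nil]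
    congr 1
    by_cases hb : 0 < y ∧ 0 < m
    · obtain ⟨hy0, hm0⟩ := hb
      obtain ⟨y', rfl⟩ : ∃ y', y = y' + 1 := ⟨y - 1, by omega⟩
      obtain ⟨m', rfl⟩ : ∃ m', m = m' + 1 := ⟨m - 1, by omega⟩
      have h1 : ((y' + 1 : Nat) : Int) - 1 = ((y' : Nat) : Int) := by push_cast; ring
      have h2 : ((m' + 1 : Nat) : Int) - 1 = ((m' : Nat) : Int) := by push_cast; ring
      have hget : ((List.range (y' + 1)).map (rowAlt grid))[y']? = some (rowAlt grid y') := by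
        simp
      have hm' : m' < (grid.getD y' []).length := by
        have := hlen hy0
        simp only [Nat.add_sub_cancel] at this
        omega
      have hr : (List.range (grid.getD y' []).length)[m']? = some m' := by
        rw [List.getElem?_eq_getElem (by simpa using hm')]
        simp
      have hget2 : (rowAlt grid y')[m']? = some (diagSum grid y' m') := by
        unfold rowAlt
        rw [List.getElem?_map, hr]
        rfl
      rw [if_pos ⟨hy0, hm0⟩, h1, h2, PySem.List.pyGet?_natCast, hget, diagSum_succ]
      simp [PySem.List.pyGet?_natCast, hget2]
    · rw [if_neg hb, diagSum_border grid y m (by omega)]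
      ring

-- outer loop invariant
lemma outer_eq (grid : List (List Int)) (hpre : Pre_buildFirstDiagonalSum grid)
    (n : Nat) (hn : n ≤ grid.length) :
    (List.range n).foldl (fun acc (y : Nat) =>
      acc ++ [((List.range (grid.getD y []).length).foldl (fun r (x : Nat) =>
        r ++ [(if 0 < y ∧ 0 < x then
                 ((PySem.List.pyGet? acc ((y : Int) - 1)).bind
                   (fun pr => PySem.List.pyGet? pr ((x : Int) - 1))).getD 0
               else 0) + (grid.getD y []).getD x 0]) [])]) []
    = (List.range n).map (rowAlt grid) := by
  induction n with
  | zero => simp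
  | succ n ih =>
    rw [List.range_succ, List.foldl_append, List.map_append, ih (by omega)]
    simp only [List.foldl_cons, List.foldl_nil, List.map_cons, List.map_nil]
    congr 2
    exact inner_eq grid n (by omega)
      (fun h0 => by
        have := pre_len grid hpre (n - 1) (by omega)
        simpa [Nat.sub_add_cancel h0] using this)
      _ le_rfl

-- ===== VERDICT (by name: the statement is the Claim_ definition above) =====
theorem buildFirstDiagonalSum_spec : Claim_equal_buildFirstDiagonalSum := by
  intro grid _ hpre
  unfold Spec_buildFirstDiagonalSum
  rw [alt_eq, buildFirstDiagonalSum]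
  exact outer_eq grid hpre grid.length le_rfl
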